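-- pv_equiv track=rewrite | github.com/nilstate/scafld | scafld/commands/shared.py | active_changes_by_file
-- ===== SOURCE A (Python) =====
-- def active_changes_by_file(active_changes):
--     """Invert active change ownership by task into per-file declarations."""
--     by_file = {}
--     for task_id, files in active_changes.items():
--         for path, ownership in files.items():
--             by_file.setdefault(path, []).append({
--                 "task_id": task_id,
--                 "ownership": ownership,
--             })
--     for path, entries in by_file.items():
--         by_file[path] = sorted(entries, key=lambda entry: entry["task_id"])
--     return by_file
-- ===== SOURCE B (Python) =====
-- def active_changes_by_file(active_changes):
--     """Invert active change ownership by task into per-file declarations."""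
--     entries = [(path, {"task_id": task_id, "ownership": ownership})
--                for task_id, files in active_changes.items()
--                for path, ownership in files.items()]
--     by_file = {path: [] for path, _ in entries}
--     for path, entry in sorted(entries, key=lambda pe: pe[1]["task_id"]):
--         by_file[path].append(entry)
--     return by_file
-- ===== Notes on version B (the rewrite author's own statement) =====
-- stated objective: alternative
-- what changed: B flattens the nested dicts once into a (path, entry) list, pre-seeds the result dict with every path, then does ONE global stable sort by task_id and a single grouping pass, instead of A's setdefault/append accumulation followed by re-sorting every per-file bucket in place.
import Mathlib
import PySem

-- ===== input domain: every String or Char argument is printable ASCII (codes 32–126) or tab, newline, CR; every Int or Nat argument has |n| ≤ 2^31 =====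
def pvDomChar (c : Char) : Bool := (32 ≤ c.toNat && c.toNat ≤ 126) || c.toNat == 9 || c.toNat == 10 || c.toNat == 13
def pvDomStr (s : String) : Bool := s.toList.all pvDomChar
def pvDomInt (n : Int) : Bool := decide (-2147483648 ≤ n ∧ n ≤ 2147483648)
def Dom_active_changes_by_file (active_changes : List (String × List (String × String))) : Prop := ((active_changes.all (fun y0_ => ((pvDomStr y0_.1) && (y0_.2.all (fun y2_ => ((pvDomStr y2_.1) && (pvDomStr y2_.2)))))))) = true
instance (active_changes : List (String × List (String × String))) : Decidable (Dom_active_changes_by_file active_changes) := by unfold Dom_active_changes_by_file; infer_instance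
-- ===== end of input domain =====

-- B flattens once, pre-seeds the result dict, then does ONE global stable sort by task_id and a
-- single grouping pass, replacing A's setdefault/append accumulation + per-bucket re-sorting.

-- ===== PORT A =====
-- sort key entry["task_id"]: every entry literally contains the key "task_id", so the
-- getD default "" is unreachable (exact on all inputs the ports ever sort).
def pvKeyFn (e : List (String × String)) : String :=
  PySem.Dict.getD (PySem.Dict.mk e) "task_id" ""

def active_changes_by_file (active_changes : List (String × List (String × String))) : List (String × List (List (String × String))) :=
  -- by_file = {}; for task_id, files: for path, ownership: by_file.setdefault(path, []).append({...})
  -- setdefault(path, []).append(e)  ≡  d[path] = d.get(path, []) + [e]  ≡  Dict.modify path [] (· ++ [e])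
  let by_file : PySem.Dict String (List (List (String × String))) :=
    active_changes.foldl (fun d tf =>
      tf.2.foldl (fun d po =>
        PySem.Dict.modify d po.1 [] (fun v => v ++ [[("task_id", tf.1), ("ownership", po.2)]])) d)
      PySem.Dict.empty
  -- for path, entries in by_file.items(): by_file[path] = sorted(entries, key=...)
  (by_file.items.foldl (fun d pe =>
      PySem.Dict.insert d pe.1 (PySem.List.sorted pe.2 pvKeyFn)) by_file).items

-- ===== PORT B =====
def active_changes_by_file_alt (active_changes : List (String × List (String × String))) : List (String × List (List (String × String))) :=
  -- entries = [(path, {"task_id": t, "ownership": o}) for t, files in ... for path, o in ...]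
  let entries : List (String × List (String × String)) :=
    active_changes.flatMap (fun tf =>
      tf.2.map (fun po => (po.1, [("task_id", tf.1), ("ownership", po.2)])))
  -- by_file = {path: [] for path, _ in entries}
  let by_file0 : PySem.Dict String (List (List (String × String))) :=
    entries.foldl (fun d pe => PySem.Dict.insert d pe.1 []) PySem.Dict.empty
  -- for path, entry in sorted(entries, key=lambda pe: pe[1]["task_id"]): by_file[path].append(entry)
  -- path is always a key of by_file, so modify's default [] is unreachable (exact here)
  ((PySem.List.sorted entries (fun pe => pvKeyFn pe.2)).foldl
      (fun d pe => PySem.Dict.modify d pe.1 [] (fun v => v ++ [pe.2])) by_file0).items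

-- ===== PRECONDITION & SPEC =====
def Spec_active_changes_by_file (active_changes : List (String × List (String × String))) (out : List (String × List (List (String × String)))) : Prop := out = active_changes_by_file_alt active_changes
instance (active_changes : List (String × List (String × String))) (out : List (String × List (List (String × String)))) : Decidable (Spec_active_changes_by_file active_changes out) := by unfold Spec_active_changes_by_file; infer_instance

-- ===== CLAIM (what is proved, stated in full; the proofs are below) =====
def Claim_equal_active_changes_by_file : Prop := ∀ (active_changes : List (String × List (String × String))), Dom_active_changes_by_file active_changes → Spec_active_changes_by_file active_changes (active_changes_by_file active_changes)

-- ===== LEMMAS AND PROOFS =====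

-- a doubly nested foldl over (task, files) pairs is the foldl over the flattened entry list
theorem foldl_nested_flatMap {α β γ σ : Type} (g : α → β → γ) (step : σ → γ → σ)
    (l : List (α × List β)) (init : σ) :
    l.foldl (fun s tf => tf.2.foldl (fun s b => step s (g tf.1 b)) s) init
      = (l.flatMap (fun tf => tf.2.map (g tf.1))).foldl step init := by
  induction l generalizing init with
  | nil => rfl
  | cons tf tl ih =>
      simp only [List.foldl_cons, List.flatMap_cons, List.foldl_append, List.foldl_map]
      exact ih _

-- folding distinct-key inserts with values given by a function of the key
theorem get?_foldl_insert_fun {ν : Type} (ks : List String) (hnd : ks.Nodup)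
    (v : String → ν) (d : PySem.Dict String ν) (k : String) :
    (ks.foldl (fun d k => d.insert k (v k)) d).get? k
      = if k ∈ ks then some (v k) else d.get? k := by
  induction ks generalizing d with
  | nil => simp
  | cons a tl ih =>
      rcases List.nodup_cons.mp hnd with ⟨ha, htl⟩
      simp only [List.foldl_cons, ih htl]
      by_cases hk : k ∈ tl
      · simp [hk, List.mem_cons.mpr (Or.inr hk)]
      · by_cases hka : k = a
        · subst hka
          simp [hk, PySem.Dict.get?_insert_self]
        · simp [hk, hka, PySem.Dict.get?_insert]

theorem keys_foldl_insert_fun {ν : Type} (ks : List String)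
    (v : String → ν) (d : PySem.Dict String ν) :
    (ks.foldl (fun d k => d.insert k (v k)) d).keys = PySem.Set.update d.keys ks := by
  have h := PySem.Dict.keys_foldl_insert_key (κ := String) (ν := ν) ks id (fun _ k => v k) d
  simpa using h

-- seeding a dict with empty buckets: every lookup with default [] still gives []
theorem getD_foldl_insert_nil {β : Type} (l : List (String × β)) (p : String)
    (d : PySem.Dict String (List (List (String × String))))
    (hd : d.getD p [] = []) :
    (l.foldl (fun d pe => d.insert pe.1 ([] : List (List (String × String)))) d).getD p [] = [] := by
  induction l generalizing d with
  | nil => exact hd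
  | cons pe tl ih =>
      refine ih _ ?_
      rw [PySem.Dict.getD_insert]
      split_ifs with h
      · rfl
      · exact hd

theorem update_of_subset (P xs : List String) (hsub : ∀ y ∈ xs, y ∈ P) :
    PySem.Set.update P xs = P := by
  rw [PySem.Set.update_eq_append_filter]
  have h : (PySem.Set.ofList xs).filter (fun y => !PySem.Set.contains P y) = [] :=
    List.filter_eq_nil_iff.mpr
      (fun y hy => by simp [hsub y ((PySem.Set.mem_ofList xs y).mp hy)])
  rw [h, List.append_nil]

-- ----- stable-sort commuting lemmas (PySem.List.sorted = foldl of insertBy) -----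

theorem map_insertBy {α β : Type} (f : α → β) (before : β → β → Bool) (x : α) (ys : List α) :
    (PySem.List.insertBy (fun a b => before (f a) (f b)) x ys).map f
      = PySem.List.insertBy before (f x) (ys.map f) := by
  induction ys with
  | nil => rfl
  | cons y ys ih =>
      simp only [PySem.List.insertBy, List.map_cons]
      by_cases h : before (f x) (f y) = true
      · simp [h]
      · simp [h, ← ih]

theorem pairwise_insertBy {α : Type} (K : α → String) (x : α) (ys : List α)
    (hs : ys.Pairwise (fun a b => K a ≤ K b)) :
    (PySem.List.insertBy (fun a b => decide (K a < K b)) x ys).Pairwise (fun a b => K a ≤ K b) := by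
  induction ys with
  | nil => simp [PySem.List.insertBy]
  | cons y ys ih =>
      rcases List.pairwise_cons.mp hs with ⟨hy, hys⟩
      by_cases h : K x < K y
      · simp only [PySem.List.insertBy, h, decide_true, if_true]
        refine List.pairwise_cons.mpr ⟨?_, hs⟩
        intro z hz
        rcases List.mem_cons.mp hz with rfl | hz
        · exact le_of_lt h
        · exact le_trans (le_of_lt h) (hy z hz)
      · simp only [PySem.List.insertBy, h, decide_false, Bool.false_eq_true, if_false]
        refine List.pairwise_cons.mpr ⟨?_, ih hys⟩
        intro z hz
        rcases (PySem.List.mem_insertBy _ _ _ _).mp hz with rfl | hz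
        · exact le_of_not_gt h
        · exact hy z hz

-- filtering commutes with a stable insertion into an already key-sorted list
theorem filter_insertBy {α : Type} (K : α → String) (q : α → Bool) (x : α) (ys : List α)
    (hs : ys.Pairwise (fun a b => K a ≤ K b)) :
    (PySem.List.insertBy (fun a b => decide (K a < K b)) x ys).filter q
      = if q x then PySem.List.insertBy (fun a b => decide (K a < K b)) x (ys.filter q)
        else ys.filter q := by
  induction ys with
  | nil =>
      by_cases h : q x <;> simp [PySem.List.insertBy, List.filter, h]
  | cons y ys ih =>
      rcases List.pairwise_cons.mp hs with ⟨hy, hys⟩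
      by_cases h : K x < K y
      · simp only [PySem.List.insertBy, h, decide_true, if_true]
        by_cases hqx : q x = true
        · have hfront : ∀ (l : List α), (∀ z ∈ l, K x < K z) →
              PySem.List.insertBy (fun a b => decide (K a < K b)) x l = x :: l := by
            intro l hl
            cases l with
            | nil => rfl
            | cons z t => simp [PySem.List.insertBy, hl z (List.mem_cons_self)]
          rw [hfront ((y :: ys).filter q) ?_]
          · simp [hqx]
          · intro z hz
            rcases List.mem_cons.mp (List.mem_of_mem_filter hz) with rfl | hz'
            · exact h
            · exact lt_of_lt_of_le h (hy z hz')
        · simp only [Bool.not_eq_true] at hqx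
          simp [hqx]
      · simp only [PySem.List.insertBy, h, decide_false, Bool.false_eq_true, if_false]
        by_cases hqy : q y = true
        · have hstep : PySem.List.insertBy (fun a b => decide (K a < K b)) x (y :: List.filter q ys)
              = y :: PySem.List.insertBy (fun a b => decide (K a < K b)) x (List.filter q ys) := by
            simp only [PySem.List.insertBy, h, decide_false, Bool.false_eq_true, if_false]
          simp only [List.filter_cons, hqy, if_true, ih hys, hstep]
          by_cases hqx : q x = true
          · rw [if_pos hqx, if_pos hqx]
          · rw [if_neg hqx, if_neg hqx]
        · simp only [Bool.not_eq_true] at hqy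
          simp only [List.filter_cons, hqy, Bool.false_eq_true, if_false, ih hys]

theorem filter_foldl_insertBy {α : Type} (K : α → String) (q : α → Bool) (xs : List α) :
    ∀ (acc : List α), acc.Pairwise (fun a b => K a ≤ K b) →
    (xs.foldl (fun acc x => PySem.List.insertBy (fun a b => decide (K a < K b)) x acc) acc).filter q
      = (xs.filter q).foldl (fun acc x => PySem.List.insertBy (fun a b => decide (K a < K b)) x acc) (acc.filter q) := by
  induction xs with
  | nil => intro acc _; rfl
  | cons x xs ih =>
      intro acc hacc
      rw [List.foldl_cons, ih _ (pairwise_insertBy K x acc hacc), filter_insertBy K q x acc hacc,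
        List.filter_cons]
      by_cases hqx : q x = true <;> simp [hqx]

-- a filtered selection of a stably key-sorted list is the stable sort of the filtered list
theorem filter_sorted {α : Type} (K : α → String) (q : α → Bool) (xs : List α) :
    (PySem.List.sorted xs K).filter q = PySem.List.sorted (xs.filter q) K := by
  rw [PySem.List.sorted_eq_foldl_insertBy, PySem.List.sorted_eq_foldl_insertBy]
  simpa using filter_foldl_insertBy K q xs [] (by simp)

theorem map_foldl_insertBy {α β : Type} (f : α → β) (K : β → String) (xs : List α) :
    ∀ (acc : List α),
    (xs.foldl (fun acc x => PySem.List.insertBy (fun a b => decide (K (f a) < K (f b))) x acc) acc).map f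
      = (xs.map f).foldl (fun acc x => PySem.List.insertBy (fun a b => decide (K a < K b)) x acc) (acc.map f) := by
  induction xs with
  | nil => intro acc; rfl
  | cons x xs ih =>
      intro acc
      rw [List.foldl_cons, ih, map_insertBy f (fun a b => decide (K a < K b)) x acc, List.map_cons,
        List.foldl_cons]

-- sorting by a key through a projection, then projecting, = projecting then sorting by the key
theorem map_sorted {α β : Type} (f : α → β) (K : β → String) (xs : List α) :
    (PySem.List.sorted xs (fun a => K (f a))).map f = PySem.List.sorted (xs.map f) K := by
  rw [PySem.List.sorted_eq_foldl_insertBy, PySem.List.sorted_eq_foldl_insertBy]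
  simpa using map_foldl_insertBy f K xs []

-- ----- the equivalence -----

theorem active_changes_by_file_eq_alt (ac : List (String × List (String × String))) :
    active_changes_by_file ac = active_changes_by_file_alt ac := by
  have hA : active_changes_by_file ac
      = (((ac.foldl (fun d tf =>
              tf.2.foldl (fun d po =>
                PySem.Dict.modify d po.1 [] (fun v => v ++ [[("task_id", tf.1), ("ownership", po.2)]])) d)
            PySem.Dict.empty).items.foldl
            (fun d pe => PySem.Dict.insert d pe.1 (PySem.List.sorted pe.2 pvKeyFn))
            (ac.foldl (fun d tf =>
              tf.2.foldl (fun d po =>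
                PySem.Dict.modify d po.1 [] (fun v => v ++ [[("task_id", tf.1), ("ownership", po.2)]])) d)
            PySem.Dict.empty)).items) := rfl
  have hB : active_changes_by_file_alt ac
      = (((PySem.List.sorted
              (ac.flatMap (fun tf => tf.2.map (fun po => (po.1, [("task_id", tf.1), ("ownership", po.2)]))))
              (fun pe => pvKeyFn pe.2)).foldl
            (fun d pe => PySem.Dict.modify d pe.1 [] (fun v => v ++ [pe.2]))
            ((ac.flatMap (fun tf => tf.2.map (fun po => (po.1, [("task_id", tf.1), ("ownership", po.2)])))).foldl
              (fun d pe => PySem.Dict.insert d pe.1 []) PySem.Dict.empty)).items) := rfl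
  rw [hA, hB]
  set E : List (String × List (String × String)) :=
    ac.flatMap (fun tf => tf.2.map (fun po => (po.1, [("task_id", tf.1), ("ownership", po.2)]))) with hE
  set P : List String := PySem.List.dedup (E.map Prod.fst) with hP
  set G : String → List (List (String × String)) :=
    fun p => (E.filter (fun pe => pe.1 == p)).map Prod.snd with hG
  have hPnd : P.Nodup := PySem.List.nodup_dedup _
  -- flatten A's nested accumulation loop
  have hflat :
      (ac.foldl (fun d tf =>
          tf.2.foldl (fun d po =>
            PySem.Dict.modify d po.1 [] (fun v => v ++ [[("task_id", tf.1), ("ownership", po.2)]])) d)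
        PySem.Dict.empty)
      = E.foldl (fun d p => PySem.Dict.modify d p.1 [] (fun v => v ++ [p.2])) PySem.Dict.empty := by
    rw [hE]
    exact foldl_nested_flatMap
      (fun t po => (po.1, [("task_id", t), ("ownership", po.2)]))
      (fun d p => PySem.Dict.modify d p.1 [] (fun v => v ++ [p.2])) ac _
  rw [hflat]
  set by_file := E.foldl (fun d p => PySem.Dict.modify d p.1 [] (fun v => v ++ [p.2])) PySem.Dict.empty with hbf
  -- characterize A's by_file
  have hkeys : by_file.keys = P := by
    rw [hbf]
    have h := PySem.Dict.keys_foldl_modify_key (ν := List (List (String × String))) E Prod.fst []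
      (fun _ p v => v ++ [p.2]) PySem.Dict.empty
    simpa [PySem.List.dedup_eq_ofList] using h
  have hknd : by_file.keys.Nodup := hkeys ▸ hPnd
  have hgetD : ∀ p, by_file.getD p [] = G p := by
    intro p
    rw [hbf]
    have h := PySem.Dict.getD_foldl_modify_append E PySem.Dict.empty p
    simpa [hG] using h
  have hitems : by_file.items = P.map (fun k => (k, G k)) := by
    rw [PySem.Dict.items_eq_map_keys by_file hknd [], hkeys]
    exact List.map_congr_left (fun k _ => by rw [hgetD k])
  -- second loop of A: re-sort each bucket in place
  rw [hitems, List.foldl_map]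
  set D2 := P.foldl (fun d k => PySem.Dict.insert d k (PySem.List.sorted (G k) pvKeyFn)) by_file with hD2
  have hD2keys : D2.keys = P := by
    rw [hD2, keys_foldl_insert_fun, hkeys, update_of_subset P P (fun y hy => hy)]
  have hD2get : ∀ k, k ∈ P → D2.getD k [] = PySem.List.sorted (G k) pvKeyFn := by
    intro k hk
    rw [hD2, PySem.Dict.getD_eq_get?_getD, get?_foldl_insert_fun P hPnd _ by_file k]
    simp [hk]
  have hD2items : D2.items = P.map (fun k => (k, PySem.List.sorted (G k) pvKeyFn)) := by
    rw [PySem.Dict.items_eq_map_keys D2 (hD2keys ▸ hPnd) [], hD2keys]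
    exact List.map_congr_left (fun k hk => by rw [hD2get k hk])
  rw [hD2items]
  -- characterize B's seeded dict
  set BF0 := E.foldl (fun d pe => PySem.Dict.insert d pe.1 ([] : List (List (String × String)))) PySem.Dict.empty with hBF0
  have hK0 : BF0.keys = P := by
    rw [hBF0]
    have h := PySem.Dict.keys_foldl_insert_key (ν := List (List (String × String))) E Prod.fst
      (fun _ _ => []) PySem.Dict.empty
    simpa [PySem.List.dedup_eq_ofList] using h
  have hK0nd : BF0.keys.Nodup := hK0 ▸ hPnd
  have hG0 : ∀ p, BF0.getD p [] = [] := by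
    intro p
    rw [hBF0]
    exact getD_foldl_insert_nil E p PySem.Dict.empty (by simp)
  -- B's grouping pass over the globally sorted entry list
  set SE := PySem.List.sorted E (fun pe => pvKeyFn pe.2) with hSE
  set D2B := SE.foldl (fun d pe => PySem.Dict.modify d pe.1 [] (fun v => v ++ [pe.2])) BF0 with hD2B
  have hBkeys : D2B.keys = P := by
    rw [hD2B]
    have h := PySem.Dict.keys_foldl_modify_key (ν := List (List (String × String))) SE Prod.fst []
      (fun _ pe v => v ++ [pe.2]) BF0
    rw [h, hK0]
    refine update_of_subset P (SE.map Prod.fst) ?_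
    intro y hy
    rcases List.mem_map.mp hy with ⟨pe, hpe, rfl⟩
    have hpeE : pe ∈ E := (PySem.List.mem_sorted _ _ _ _).mp (hSE ▸ hpe)
    rw [hP]
    exact (PySem.List.mem_dedup _ _).mpr (List.mem_map.mpr ⟨pe, hpeE, rfl⟩)
  have hBget : ∀ p, D2B.getD p [] = (SE.filter (fun pe => pe.1 == p)).map Prod.snd := by
    intro p
    rw [hD2B]
    have h := PySem.Dict.getD_foldl_modify_append SE BF0 p
    rw [h, hG0]
    simp
  have hBnd : D2B.keys.Nodup := hBkeys ▸ hPnd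
  have hBitems : D2B.items = P.map (fun k => (k, (SE.filter (fun pe => pe.1 == k)).map Prod.snd)) := by
    rw [PySem.Dict.items_eq_map_keys D2B hBnd [], hBkeys]
    exact List.map_congr_left (fun k _ => by rw [hBget k])
  rw [hBitems]
  -- pointwise: bucket of the global stable sort = stable sort of the bucket
  refine List.map_congr_left (fun k _ => ?_)
  have h1 : SE.filter (fun pe => pe.1 == k)
      = PySem.List.sorted (E.filter (fun pe => pe.1 == k)) (fun pe => pvKeyFn pe.2) := by
    rw [hSE]
    exact filter_sorted (fun pe => pvKeyFn pe.2) (fun pe => pe.1 == k) E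
  have h2 : (PySem.List.sorted (E.filter (fun pe => pe.1 == k)) (fun pe => pvKeyFn pe.2)).map Prod.snd
      = PySem.List.sorted (G k) pvKeyFn := by
    rw [hG]
    exact map_sorted Prod.snd pvKeyFn (E.filter (fun pe => pe.1 == k))
  rw [h1, h2]

-- ===== VERDICT (by name: the statement is the Claim_ definition above) =====
theorem active_changes_by_file_spec : Claim_equal_active_changes_by_file := by
  intro ac _
  unfold Spec_active_changes_by_file
  exact active_changes_by_file_eq_alt ac
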